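-- pv_equiv track=rewrite | github.com/maykon1313/Faculdade | 1º Semester/Algoritmo e programação 1/Exercícios/Atividade de laboratório 2/Projeto_final.py | remover_alunos_disciplina
-- ===== SOURCE A (Python) =====
-- def procura(busca, lista):
--     i = 0
--     while i < len(lista):
--         if busca == lista[i]:
--             return i
--         i += 1
--     return -1
--
-- def remover_alunos_disciplina(index_dici, index, alunos_disciplina, cpf):
--     materia_nova = []
--     materia = alunos_disciplina[index_dici]
--     index_do_aluno = procura(cpf, materia)
--     i = 0
--     while (i < len(materia)):
--         if (i != index_do_aluno):
--             materia_nova.append(materia[i])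
--         i += 1
--
--     alunos_disciplina[index_dici] = materia_nova
--
--     return alunos_disciplina
-- ===== SOURCE B (Python) =====
-- def remover_alunos_disciplina(index_dici, index, alunos_disciplina, cpf):
--     nova = []
--     removido = False
--     for aluno in alunos_disciplina[index_dici]:
--         if not removido and aluno == cpf:
--             removido = True
--         else:
--             nova.append(aluno)
--     alunos_disciplina[index_dici] = nova
--     return alunos_disciplina
-- ===== Notes on version B (the rewrite author's own statement) =====
-- stated objective: simpler
-- what changed: Replaced the helper-based two-pass (find the index of cpf, then rebuild the list skipping that index) by a single flag-based pass that skips the first element equal to cpf while copying the rest.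
import Mathlib
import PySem

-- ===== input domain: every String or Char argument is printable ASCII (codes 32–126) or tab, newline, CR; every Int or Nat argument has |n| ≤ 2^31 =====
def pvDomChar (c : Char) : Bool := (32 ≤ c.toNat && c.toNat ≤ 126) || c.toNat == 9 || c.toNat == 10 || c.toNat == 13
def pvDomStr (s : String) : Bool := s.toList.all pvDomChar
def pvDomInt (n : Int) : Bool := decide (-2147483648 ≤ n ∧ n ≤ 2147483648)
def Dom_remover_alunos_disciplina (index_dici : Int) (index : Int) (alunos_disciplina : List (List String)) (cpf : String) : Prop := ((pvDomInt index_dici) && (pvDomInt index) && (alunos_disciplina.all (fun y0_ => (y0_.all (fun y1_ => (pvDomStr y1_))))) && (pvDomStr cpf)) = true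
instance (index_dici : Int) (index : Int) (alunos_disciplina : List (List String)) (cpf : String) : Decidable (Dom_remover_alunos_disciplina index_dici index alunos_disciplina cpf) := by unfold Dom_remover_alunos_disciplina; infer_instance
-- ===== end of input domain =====

-- ===== PORT A =====
-- B replaces A's helper-based two-pass (find index, rebuild skipping it) by one flag-based pass;
-- both Pythons mutate alunos_disciplina[index_dici] in place identically; equivalence is about the return value.
def procuraGo (busca : String) (lista : List String) (i : Nat) : Int :=
  if h : i < lista.length then
    if busca = lista[i] then (i : Int) else procuraGo busca lista (i + 1)
  else -1
termination_by lista.length - i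

def procura (busca : String) (lista : List String) : Int := procuraGo busca lista 0

def remover_alunos_disciplina (index_dici : Int) (index : Int) (alunos_disciplina : List (List String)) (cpf : String) : List (List String) :=
  let materia := PySem.List.pyGetD alunos_disciplina index_dici []
  let index_do_aluno := procura cpf materia
  let materia_nova := (List.range materia.length).foldl
    (fun (acc : List String) (i : Nat) => if ((i : Int) ≠ index_do_aluno) then acc ++ [materia.getD i ""] else acc) []
  PySem.List.pySetD alunos_disciplina index_dici materia_nova

-- ===== PORT B =====
def remover_alunos_disciplina_alt (index_dici : Int) (index : Int) (alunos_disciplina : List (List String)) (cpf : String) : List (List String) :=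
  let st := (PySem.List.pyGetD alunos_disciplina index_dici []).foldl
    (fun (st : Bool × List String) aluno =>
      if !st.1 && (aluno = cpf) then (true, st.2) else (st.1, st.2 ++ [aluno]))
    (false, [])
  PySem.List.pySetD alunos_disciplina index_dici st.2

-- ===== PRECONDITION & SPEC =====
-- Pre_ excludes exactly the inputs where the Python A raises IndexError (index_dici out of range).
def Pre_remover_alunos_disciplina (index_dici : Int) (index : Int) (alunos_disciplina : List (List String)) (cpf : String) : Prop :=
  PySem.Raise.InRange alunos_disciplina.length index_dici
instance (index_dici : Int) (index : Int) (alunos_disciplina : List (List String)) (cpf : String) : Decidable (Pre_remover_alunos_disciplina index_dici index alunos_disciplina cpf) := by unfold Pre_remover_alunos_disciplina; infer_instance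

def pvWitness_remover_alunos_disciplina : Int × Int × List (List String) × String := (0, 0, [["1", "2"]], "1")

def Spec_remover_alunos_disciplina (index_dici : Int) (index : Int) (alunos_disciplina : List (List String)) (cpf : String) (out : List (List String)) : Prop := out = remover_alunos_disciplina_alt index_dici index alunos_disciplina cpf
instance (index_dici : Int) (index : Int) (alunos_disciplina : List (List String)) (cpf : String) (out : List (List String)) : Decidable (Spec_remover_alunos_disciplina index_dici index alunos_disciplina cpf out) := by unfold Spec_remover_alunos_disciplina; infer_instance

-- ===== CLAIM (what is proved, stated in full; the proofs are below) =====
def Claim_equal_remover_alunos_disciplina : Prop := ∀ (index_dici : Int) (index : Int) (alunos_disciplina : List (List String)) (cpf : String), Dom_remover_alunos_disciplina index_dici index alunos_disciplina cpf → Pre_remover_alunos_disciplina index_dici index alunos_disciplina cpf → Spec_remover_alunos_disciplina index_dici index alunos_disciplina cpf (remover_alunos_disciplina index_dici index alunos_disciplina cpf)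

-- ===== LEMMAS AND PROOFS =====

-- the common target: remove the first element equal to cpf (if any)
def rmSpec (cpf : String) (l : List String) : List String :=
  match l.findIdx? (fun a => cpf = a) with
  | none => l
  | some k => l.eraseIdx k

-- A's helper computes the findIdx? of the suffix, shifted
lemma procuraGo_spec (busca : String) (l : List String) (i : Nat) :
    procuraGo busca l i =
      match (l.drop i).findIdx? (fun a => busca = a) with
      | none => -1
      | some j => ((i + j : Nat) : Int) := by
  by_cases h : i < l.length
  · rw [procuraGo]
    have hd : l.drop i = l[i] :: l.drop (i + 1) := List.drop_eq_getElem_cons h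
    rw [hd, List.findIdx?_cons]
    by_cases hb : busca = l[i]
    · simp [h, hb]
    · have ih := procuraGo_spec busca l (i + 1)
      simp only [h, dif_pos, hb, decide_false]
      rw [ih]
      cases hfi : (l.drop (i + 1)).findIdx? (fun a => busca = a) with
      | none => simp
      | some j => simp [Option.map_some]; ring
  · rw [procuraGo]
    simp [h, List.drop_eq_nil_of_le (le_of_not_gt h)]
termination_by l.length - i
decreasing_by omega

lemma procura_spec (busca : String) (l : List String) :
    procura busca l =
      match l.findIdx? (fun a => busca = a) with
      | none => -1
      | some j => (j : Int) := by
  unfold procura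
  rw [procuraGo_spec]
  simp

lemma map_getD_range (l : List String) :
    (List.range l.length).map (fun i => l.getD i "") = l := by
  apply List.ext_getElem
  · simp
  · intro i h1 h2
    simp only [List.getElem_map, List.getElem_range]
    rw [List.getD_eq_getElem l "" h2]

lemma map_getD_range'_drop (l : List String) (a n : Nat) (h : a + n ≤ l.length)
    (hn : n = l.length - a) :
    (List.range' a n).map (fun i => l.getD i "") = l.drop a := by
  apply List.ext_getElem
  · simp; omega
  · intro i h1 h2
    simp only [List.getElem_map, List.getElem_range', List.getElem_drop, one_mul]
    have : a + i < l.length := by simp at h1; omega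
    rw [List.getD_eq_getElem l "" this]

-- A's rebuild loop equals rmSpec
lemma loopA_spec (cpf : String) (l : List String) :
    (List.range l.length).foldl
      (fun (acc : List String) (i : Nat) => if ((i : Int) ≠ procura cpf l) then acc ++ [l.getD i ""] else acc) [] =
    rmSpec cpf l := by
  rw [show (fun (acc : List String) (i : Nat) => if ((i : Int) ≠ procura cpf l) then acc ++ [l.getD i ""] else acc)
        = (fun (acc : List String) (i : Nat) => if (decide ((i : Int) ≠ procura cpf l)) = true then acc ++ [l.getD i ""] else acc)
      from by funext acc i; simp]
  rw [PySem.List.foldl_append_if (fun (i : Nat) => decide ((i : Int) ≠ procura cpf l)) (fun (i : Nat) => l.getD i "") (List.range l.length) []]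
  rw [List.nil_append, rmSpec, procura_spec]
  cases hfi : l.findIdx? (fun a => cpf = a) with
  | none =>
    have : ∀ i ∈ List.range l.length, decide ((i : Int) ≠ (-1 : Int)) = true := by
      intro i _; simp
    rw [List.filter_eq_self.mpr this, map_getD_range]
  | some k =>
    have hk : k < l.length := by
      obtain ⟨h, -, -⟩ := List.findIdx?_eq_some_iff_getElem.mp hfi
      exact h
    have hsplit : List.range l.length = List.range' 0 k ++ List.range' k (l.length - k) := by
      rw [List.range_eq_range', show List.range' k (l.length - k) = List.range' (0 + 1 * k) (l.length - k) from by norm_num,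
        List.range'_append]
      congr 1
      omega
    have hcons : List.range' k (l.length - k) = k :: List.range' (k + 1) (l.length - k - 1) := by
      rw [show l.length - k = (l.length - k - 1) + 1 from by omega, List.range'_succ]
      norm_num
    rw [hsplit, hcons, List.filter_append, List.filter_cons]
    have hkk : decide ((k : Int) ≠ (k : Int)) = false := by simp
    simp only [hkk, Bool.false_eq_true, if_false]
    have hlow : ∀ i ∈ List.range' 0 k, decide ((i : Int) ≠ (k : Int)) = true := by
      intro i hi
      have := List.mem_range'_1.mp hi
      simp; omega
    have hhigh : ∀ i ∈ List.range' (k + 1) (l.length - k - 1), decide ((i : Int) ≠ (k : Int)) = true := by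
      intro i hi
      have := List.mem_range'_1.mp hi
      simp; omega
    rw [List.filter_eq_self.mpr hlow, List.filter_eq_self.mpr hhigh, List.map_append]
    have h1 : (List.range' 0 k).map (fun i => l.getD i "") = l.take k := by
      apply List.ext_getElem
      · simp; omega
      · intro i h1 h2
        simp only [List.getElem_map, List.getElem_range', List.getElem_take, one_mul, Nat.zero_add]
        have : i < l.length := by simp at h2; omega
        rw [List.getD_eq_getElem l "" this]
    have h2 : (List.range' (k + 1) (l.length - k - 1)).map (fun i => l.getD i "") = l.drop (k + 1) := by
      apply map_getD_range'_drop l (k + 1) (l.length - k - 1) (by omega) (by omega)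
    rw [h1, h2, List.eraseIdx_eq_take_drop_succ]

-- B's flag loop, once the flag is set, copies the rest
lemma loopB_true (cpf : String) (l : List String) (acc : List String) :
    (l.foldl (fun (st : Bool × List String) aluno =>
      if !st.1 && (aluno = cpf) then (true, st.2) else (st.1, st.2 ++ [aluno])) (true, acc)) =
    (true, acc ++ l) := by
  induction l generalizing acc with
  | nil => simp
  | cons a t ih =>
    rw [List.foldl_cons]
    simp only [Bool.not_true, Bool.false_and, Bool.false_eq_true, if_false]
    rw [ih]
    simp

-- B's flag loop from a clear flag removes the first match
lemma loopB_false (cpf : String) (l : List String) (acc : List String) :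
    (l.foldl (fun (st : Bool × List String) aluno =>
      if !st.1 && (aluno = cpf) then (true, st.2) else (st.1, st.2 ++ [aluno])) (false, acc)).2 =
    acc ++ rmSpec cpf l := by
  induction l generalizing acc with
  | nil => simp [rmSpec]
  | cons a t ih =>
    by_cases h : a = cpf
    · simp only [List.foldl_cons, h, decide_true, Bool.not_false, Bool.true_and, if_pos]
      rw [loopB_true]
      simp [rmSpec, List.findIdx?_cons]
    · simp only [List.foldl_cons, h, decide_false, Bool.not_false, Bool.true_and,
        Bool.false_eq_true, if_false]
      rw [ih]
      have hne : (decide (cpf = a)) = false := by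
        simp [Ne.symm h]
      simp only [rmSpec, List.findIdx?_cons, hne]
      cases hfi : t.findIdx? (fun x => cpf = x) with
      | none => simp
      | some j => simp [List.eraseIdx_cons_succ]

-- ===== VERDICT (by name: the statement is the Claim_ definition above) =====
theorem remover_alunos_disciplina_spec : Claim_equal_remover_alunos_disciplina := by
  intro index_dici index alunos_disciplina cpf _hDom hPre
  unfold Spec_remover_alunos_disciplina remover_alunos_disciplina remover_alunos_disciplina_alt
  dsimp only
  rw [loopA_spec cpf (PySem.List.pyGetD alunos_disciplina index_dici []),
    loopB_false cpf (PySem.List.pyGetD alunos_disciplina index_dici []) [], List.nil_append]
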